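-- pv_equiv track=rewrite | github.com/OkhotnikovFN/Yandex-Algorithms | trainings_1.0/hw_5/task_j/j.py | get_triangles_count
-- ===== SOURCE A (Python) =====
-- from collections import defaultdict
-- from typing import List, Tuple
--
-- def get_squared_distance(a: Tuple[int, int], b: Tuple[int, int]) -> int:
--     """
--     Функция определяет квадрат расстояния между точками.
--         Параметры:
--             :param a: координаты первой точки
--             :type a: Tuple[int, int]
--             :param b: координаты второй точки
--             :type b: Tuple[int, int]
--         Возвращаемое значение:
--             :return: квадрат расстояния между точками
--             :rtype: int
--     """
--     return (a[0] - b[0]) ** 2 + (a[1] - b[1]) ** 2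
--
-- def get_triangles_count(points: List[Tuple[int, int]]) -> int:
--     """
--     Функция определяет количество равнобедренных треугольников.
--         Параметры:
--             :param points: список координат точек
--             :type points: List[Tuple[int, int]
--         Возвращаемое значение:
--             :return: количество равнобедренных треугольников
--             :rtype: int
--     """
--     triangles_count = 0
--     for first_index, first_point in enumerate(points):
--         points_by_distances = defaultdict(list)
--         for second_index, second_point in enumerate(points):
--             if first_index == second_index:
--                 continue
--
--             squared_distance = get_squared_distance(first_point, second_point)
--
--             for previous_point in points_by_distances[squared_distance]:
--                 if 4 * squared_distance > get_squared_distance(previous_point, second_point):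
--                     triangles_count += 1
--
--             points_by_distances[squared_distance].append(second_point)
--
--     return triangles_count
-- ===== SOURCE B (Python) =====
-- def get_triangles_count(points):
--     """Per apex, count via distance/point counters using the identity
--     4d - |pq|^2 = |p + q - 2a|^2 for p, q at equal squared distance d from a."""
--     total = 0
--     for i, a in enumerate(points):
--         dist_counts = {}
--         pt_counts = {}
--         for j, p in enumerate(points):
--             if i == j:
--                 continue
--             d = (a[0] - p[0]) ** 2 + (a[1] - p[1]) ** 2
--             if d == 0:
--                 continue
--             mirror = (2 * a[0] - p[0], 2 * a[1] - p[1])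
--             total += dist_counts.get(d, 0) - pt_counts.get(mirror, 0)
--             dist_counts[d] = dist_counts.get(d, 0) + 1
--             pt_counts[p] = pt_counts.get(p, 0) + 1
--     return total
-- ===== Notes on version B (the rewrite author's own statement) =====
-- stated objective: alternative
-- what changed: Per apex, A's inner scan over the equal-distance bucket (triple nested loop with a geometric test per previous point) is replaced by two counter lookups using the identity 4d - |pq|^2 = |p+q-2a|^2: contribution = (#points at distance d so far) - (#occurrences of the mirror point 2a-p so far).
import Mathlib
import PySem

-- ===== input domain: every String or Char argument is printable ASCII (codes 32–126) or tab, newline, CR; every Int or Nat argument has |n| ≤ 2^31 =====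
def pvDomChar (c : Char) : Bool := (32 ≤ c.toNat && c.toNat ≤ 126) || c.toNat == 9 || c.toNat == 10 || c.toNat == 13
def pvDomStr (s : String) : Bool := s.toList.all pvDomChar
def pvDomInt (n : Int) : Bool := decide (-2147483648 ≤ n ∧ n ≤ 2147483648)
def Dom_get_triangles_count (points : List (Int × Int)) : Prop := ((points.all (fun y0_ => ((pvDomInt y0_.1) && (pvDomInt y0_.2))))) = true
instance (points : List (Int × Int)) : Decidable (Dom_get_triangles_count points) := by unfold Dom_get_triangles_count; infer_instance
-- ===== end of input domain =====

-- B replaces A's per-apex inner scan over the equal-distance bucket by two counter lookups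
-- (same-distance count minus mirror-point count), via the identity 4d - |pq|^2 = |p+q-2a|^2.

-- ===== PORT A =====
-- helper get_squared_distance
def pvSqd (a b : Int × Int) : Int := (a.1 - b.1) ^ 2 + (a.2 - b.2) ^ 2

-- inner-loop body of A (defaultdict bucket read = getD, append = insert)
def pvStepA (fi : Int) (fp : Int × Int) (st : Int × PySem.Dict Int (List (Int × Int)))
    (se : Int × (Int × Int)) : Int × PySem.Dict Int (List (Int × Int)) :=
  if fi == se.1 then st
  else
    let d := pvSqd fp se.2
    let bucket := st.2.getD d []
    let c := bucket.foldl (fun c prev => if 4 * d > pvSqd prev se.2 then c + 1 else c) st.1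
    (c, st.2.insert d (bucket ++ [se.2]))

def get_triangles_count (points : List (Int × Int)) : Int :=
  (PySem.List.enumerate points).foldl
    (fun acc fe =>
      ((PySem.List.enumerate points).foldl (pvStepA fe.1 fe.2) (acc, PySem.Dict.empty)).1) 0

-- ===== PORT B =====
-- inner-loop body of B: two counters instead of the bucket scan
def pvStepB (fi : Int) (fp : Int × Int)
    (st : Int × PySem.Dict Int Int × PySem.Dict (Int × Int) Int)
    (se : Int × (Int × Int)) : Int × PySem.Dict Int Int × PySem.Dict (Int × Int) Int :=
  if fi == se.1 then st
  else
    let p := se.2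
    let d := (fp.1 - p.1) ^ 2 + (fp.2 - p.2) ^ 2
    if d == 0 then st
    else
      let m := (2 * fp.1 - p.1, 2 * fp.2 - p.2)
      (st.1 + st.2.1.getD d 0 - st.2.2.getD m 0,
       st.2.1.insert d (st.2.1.getD d 0 + 1),
       st.2.2.insert p (st.2.2.getD p 0 + 1))

def get_triangles_count_alt (points : List (Int × Int)) : Int :=
  (PySem.List.enumerate points).foldl
    (fun acc fe =>
      ((PySem.List.enumerate points).foldl (pvStepB fe.1 fe.2)
        (acc, PySem.Dict.empty, PySem.Dict.empty)).1) 0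

-- ===== PRECONDITION & SPEC =====
def Spec_get_triangles_count (points : List (Int × Int)) (out : Int) : Prop := out = get_triangles_count_alt points
instance (points : List (Int × Int)) (out : Int) : Decidable (Spec_get_triangles_count points out) := by unfold Spec_get_triangles_count; infer_instance

-- ===== CLAIM (what is proved, stated in full; the proofs are below) =====
def Claim_equal_get_triangles_count : Prop := ∀ (points : List (Int × Int)), Dom_get_triangles_count points → Spec_get_triangles_count points (get_triangles_count points)

-- ===== LEMMAS AND PROOFS =====

lemma pvSqd_nonneg (a b : Int × Int) : 0 ≤ pvSqd a b := by
  unfold pvSqd; positivity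

lemma pvSqd_eq_zero {a b : Int × Int} : pvSqd a b = 0 ↔ b = a := by
  obtain ⟨ax, ay⟩ := a; obtain ⟨bx, by'⟩ := b
  unfold pvSqd
  constructor
  · intro h
    have h1 := sq_nonneg (ax - bx)
    have h2 := sq_nonneg (ay - by')
    have e1 : (ax - bx) ^ 2 = 0 := by linarith
    have e2 : (ay - by') ^ 2 = 0 := by linarith
    have f1 : ax - bx = 0 := by nlinarith [sq_abs (ax - bx)]
    have f2 : ay - by' = 0 := by nlinarith [sq_abs (ay - by')]
    simp only [Prod.mk.injEq]
    omega
  · rintro ⟨rfl, rfl⟩; ring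

-- the geometric identity: for p, q both at squared distance d from fp,
-- the strict triangle condition holds iff q is not the mirror of p through fp
lemma pvCond_iff {fp q p : Int × Int} {d : Int}
    (hq : pvSqd fp q = d) (hp : pvSqd fp p = d) :
    (4 * d > pvSqd q p) ↔ q ≠ (2 * fp.1 - p.1, 2 * fp.2 - p.2) := by
  obtain ⟨ax, ay⟩ := fp; obtain ⟨qx, qy⟩ := q; obtain ⟨px, py⟩ := p
  simp only [pvSqd, Prod.mk.injEq] at hq hp ⊢
  have key : 4 * d - ((qx - px) ^ 2 + (qy - py) ^ 2)
      = (qx + px - 2 * ax) ^ 2 + (qy + py - 2 * ay) ^ 2 := by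
    linear_combination (-2) * hp + (-2) * hq
  constructor
  · intro h hc
    injection hc with e1 e2
    subst e1; subst e2
    ring_nf at key
    linarith
  · intro hne
    have hne' : ¬(qx = 2 * ax - px ∧ qy = 2 * ay - py) :=
      fun hc => hne (by rw [hc.1, hc.2])
    rcases not_and_or.mp hne' with h | h
    · have h0 : qx + px - 2 * ax ≠ 0 := by omega
      have hpos : 0 < (qx + px - 2 * ax) ^ 2 := by positivity
      nlinarith [sq_nonneg (qy + py - 2 * ay)]
    · have h0 : qy + py - 2 * ay ≠ 0 := by omega
      have hpos : 0 < (qy + py - 2 * ay) ^ 2 := by positivity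
      nlinarith [sq_nonneg (qx + px - 2 * ax)]

-- A's bucket scan counts: bucket size minus occurrences of the mirror point
lemma pvScan (fp p : Int × Int) (d : Int) (hp : pvSqd fp p = d) :
    ∀ (L : List (Int × Int)) (c : Int), (∀ q ∈ L, pvSqd fp q = d) →
      L.foldl (fun c q => if 4 * d > pvSqd q p then c + 1 else c) c
        = c + (L.length : Int) - (L.count (2 * fp.1 - p.1, 2 * fp.2 - p.2) : Int) := by
  intro L
  induction L with
  | nil => intro c _; simp
  | cons q L ih =>
    intro c hall
    have hq : pvSqd fp q = d := hall q (by simp)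
    have hcond := pvCond_iff hq hp
    by_cases hqm : q = (2 * fp.1 - p.1, 2 * fp.2 - p.2)
    · have hn : ¬(4 * d > pvSqd q p) := fun h => (hcond.mp h) hqm
      simp only [List.foldl_cons, if_neg hn]
      rw [ih c (fun x hx => hall x (by simp [hx]))]
      simp [hqm]
      ring
    · have : 4 * d > pvSqd q p := hcond.mpr hqm
      simp only [List.foldl_cons, if_pos this]
      rw [ih (c + 1) (fun x hx => hall x (by simp [hx]))]
      simp [hqm]
      ring

-- the two inner loops advance their accumulators by equal amounts, given the
-- invariant tying A's buckets to B's two counters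
lemma pvInner_eq (fi : Int) (fp : Int × Int) :
    ∀ (l : List (Int × (Int × Int))) (cA cB : Int)
      (dict : PySem.Dict Int (List (Int × Int)))
      (dc : PySem.Dict Int Int) (pc : PySem.Dict (Int × Int) Int),
      (∀ d q, q ∈ dict.getD d [] → pvSqd fp q = d) →
      (∀ d, d ≠ 0 → dc.getD d 0 = ((dict.getD d []).length : Int)) →
      (∀ q, q ≠ fp → pc.getD q 0 = (((dict.getD (pvSqd fp q) []).count q : Nat) : Int)) →
      (l.foldl (pvStepA fi fp) (cA, dict)).1 - cA
        = (l.foldl (pvStepB fi fp) (cB, dc, pc)).1 - cB := by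
  intro l
  induction l with
  | nil => intro cA cB dict dc pc _ _ _; simp
  | cons se t ih =>
    intro cA cB dict dc pc I1 I2 I3
    obtain ⟨si, sp⟩ := se
    simp only [List.foldl_cons]
    by_cases hskip : (fi == si) = true
    · simp only [pvStepA, pvStepB, if_pos hskip]
      exact ih cA cB dict dc pc I1 I2 I3
    · by_cases h0 : pvSqd fp sp = 0
      · -- distance 0: A's scan adds nothing (4*0 > nonneg is false), B skips
        have hsp : sp = fp := pvSqd_eq_zero.mp h0
        have hB : pvStepB fi fp (cB, dc, pc) (si, sp) = (cB, dc, pc) := by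
          have : ((fp.1 - sp.1) ^ 2 + (fp.2 - sp.2) ^ 2) = pvSqd fp sp := rfl
          simp only [pvStepB, if_neg hskip, this, h0]
          simp
        have hscan : ∀ (L : List (Int × Int)) (c : Int),
            L.foldl (fun c prev => if 4 * pvSqd fp sp > pvSqd prev sp then c + 1 else c) c = c := by
          intro L
          induction L with
          | nil => intro c; simp
          | cons x L ihL =>
            intro c
            have hx : ¬(4 * pvSqd fp sp > pvSqd x sp) := by
              have := pvSqd_nonneg x sp
              omega
            simp only [List.foldl_cons, if_neg hx]
            exact ihL c
        have hA : pvStepA fi fp (cA, dict) (si, sp)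
            = (cA, dict.insert (pvSqd fp sp) (dict.getD (pvSqd fp sp) [] ++ [sp])) := by
          simp only [pvStepA, if_neg hskip]
          rw [hscan]
        rw [hA, hB]
        apply ih
        · intro d q hq
          rw [PySem.Dict.getD_insert] at hq
          by_cases hd : d = pvSqd fp sp
          · rw [if_pos hd] at hq
            rcases List.mem_append.mp hq with h | h
            · have := I1 (pvSqd fp sp) q h
              omega
            · simp at h; subst h; omega
          · rw [if_neg hd] at hq; exact I1 d q hq
        · intro d hd
          rw [PySem.Dict.getD_insert, if_neg (by omega : ¬ d = pvSqd fp sp)]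
          exact I2 d hd
        · intro q hqfp
          have hq0 : pvSqd fp q ≠ 0 := fun h => hqfp (pvSqd_eq_zero.mp h)
          rw [PySem.Dict.getD_insert, if_neg (by omega : ¬ pvSqd fp q = pvSqd fp sp)]
          exact I3 q hqfp
      · -- distance d ≠ 0: A's scan = |bucket| - count(mirror) = B's counter expression
        have hspfp : sp ≠ fp := fun h => h0 (by rw [h]; unfold pvSqd; ring)
        set d := pvSqd fp sp with hd
        set m : Int × Int := (2 * fp.1 - sp.1, 2 * fp.2 - sp.2) with hm
        have hmd : pvSqd fp m = d := by rw [hd]; unfold pvSqd; simp [hm]; ring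
        have hmfp : m ≠ fp := fun h => h0 (by rw [← hmd, h]; unfold pvSqd; ring)
        have hbucket := I1 d
        have hA : pvStepA fi fp (cA, dict) (si, sp)
            = (cA + ((dict.getD d []).length : Int) - ((dict.getD d []).count m : Int),
               dict.insert d (dict.getD d [] ++ [sp])) := by
          simp only [pvStepA, if_neg hskip, ← hd]
          rw [pvScan fp sp d hd.symm (dict.getD d []) cA hbucket]
        have hB : pvStepB fi fp (cB, dc, pc) (si, sp)
            = (cB + ((dict.getD d []).length : Int) - ((dict.getD d []).count m : Int),
               dc.insert d (dc.getD d 0 + 1),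
               pc.insert sp (pc.getD sp 0 + 1)) := by
          have he : ((fp.1 - sp.1) ^ 2 + (fp.2 - sp.2) ^ 2) = d := rfl
          simp only [pvStepB, if_neg hskip, he, ← hm]
          rw [if_neg (by simp [h0])]
          rw [I2 d h0, I3 m hmfp, hmd]
        have hI1 : ∀ d' q, q ∈ (dict.insert d (dict.getD d [] ++ [sp])).getD d' [] → pvSqd fp q = d' := by
          intro d' q hq
          rw [PySem.Dict.getD_insert] at hq
          by_cases hdd : d' = d
          · rw [if_pos hdd] at hq
            rcases List.mem_append.mp hq with h | h
            · rw [hdd]; exact I1 d q h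
            · simp at h; subst h; omega
          · rw [if_neg hdd] at hq; exact I1 d' q hq
        have hI2 : ∀ d', d' ≠ 0 → (dc.insert d (dc.getD d 0 + 1)).getD d' 0
            = (((dict.insert d (dict.getD d [] ++ [sp])).getD d' []).length : Int) := by
          intro d' hd'
          rw [PySem.Dict.getD_insert, PySem.Dict.getD_insert]
          by_cases hdd : d' = d
          · rw [if_pos hdd, if_pos hdd, I2 d h0]
            simp
          · rw [if_neg hdd, if_neg hdd]; exact I2 d' hd'
        have hI3 : ∀ q, q ≠ fp → (pc.insert sp (pc.getD sp 0 + 1)).getD q 0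
            = ((((dict.insert d (dict.getD d [] ++ [sp])).getD (pvSqd fp q) []).count q : Nat) : Int) := by
          intro q hqfp
          rw [PySem.Dict.getD_insert, PySem.Dict.getD_insert]
          by_cases hqsp : q = sp
          · rw [if_pos hqsp, if_pos (by rw [hqsp]), hqsp, I3 sp hspfp, ← hd]
            simp [List.count_append]
          · rw [if_neg hqsp]
            by_cases hqd : pvSqd fp q = d
            · rw [if_pos hqd, I3 q hqfp, hqd]
              have hc : (dict.getD d [] ++ [sp]).count q = (dict.getD d []).count q := by
                have h1 : List.count q [sp] = 0 := by
                  simp [List.count_cons, beq_iff_eq]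
                  exact fun h => hqsp h.symm
                simp [List.count_append, h1]
              rw [hc]
            · rw [if_neg hqd]; exact I3 q hqfp
        have key := ih (cA + ((dict.getD d []).length : Int) - ((dict.getD d []).count m : Int))
          (cB + ((dict.getD d []).length : Int) - ((dict.getD d []).count m : Int))
          (dict.insert d (dict.getD d [] ++ [sp]))
          (dc.insert d (dc.getD d 0 + 1))
          (pc.insert sp (pc.getD sp 0 + 1)) hI1 hI2 hI3
        rw [hA, hB]
        omega

-- per apex, A's inner loop from a fresh dict equals B's from fresh counters
lemma pvApex_eq (fi : Int) (fp : Int × Int) (l : List (Int × (Int × Int))) (acc : Int) :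
    (l.foldl (pvStepA fi fp) (acc, PySem.Dict.empty)).1
      = (l.foldl (pvStepB fi fp) (acc, PySem.Dict.empty, PySem.Dict.empty)).1 := by
  have h := pvInner_eq fi fp l acc acc PySem.Dict.empty PySem.Dict.empty PySem.Dict.empty
    (by intro d q hq; simp [PySem.Dict.getD_empty] at hq)
    (by intro d _; simp [PySem.Dict.getD_empty])
    (by intro q _; simp [PySem.Dict.getD_empty])
  omega

-- ===== VERDICT (by name: the statement is the Claim_ definition above) =====
theorem get_triangles_count_spec : Claim_equal_get_triangles_count := by
  intro points _
  unfold Spec_get_triangles_count get_triangles_count get_triangles_count_alt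
  congr 1
  funext acc fe
  exact pvApex_eq fe.1 fe.2 (PySem.List.enumerate points) acc
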